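-- pv_equiv track=rewrite | github.com/Prasanna-kumar018/Leetcode | 1376-selling-pieces-of-wood/selling-pieces-of-wood.py | sellingWood
-- ===== SOURCE A (Python) =====
-- from typing import List
--
-- def sellingWood(m: int, n: int, prices: List[List[int]]) -> int:
--     dp= [[0]*(n+1) for _ in range(m+1)]
--     for x,y,z in prices:
--         dp[x][y]=z
--
--     for i in range(1,m+1):
--         for j in range(1,n+1):
--             for k in range(1,i):
--                 dp[i][j]=max(dp[i][j],dp[i-k][j]+dp[k][j])
--             for k in range(1,j):
--                 dp[i][j]=max(dp[i][j],dp[i][j-k]+dp[i][k])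
--     return dp[m][n]
-- ===== SOURCE B (Python) =====
-- def sellingWood(m, n, prices):
--     base = [[0] * (n + 1) for _ in range(m + 1)]
--     for x, y, z in prices:
--         base[x][y] = z
--     memo = {}
--
--     def solve(i, j):
--         if i == 0 or j == 0:
--             return base[i][j]
--         key = (i, j)
--         if key in memo:
--             return memo[key]
--         best = base[i][j]
--         for k in range(1, i):
--             best = max(best, solve(i - k, j) + solve(k, j))
--         for k in range(1, j):
--             best = max(best, solve(i, j - k) + solve(i, k))
--         memo[key] = best
--         return best
--
--     return solve(m, n)
-- ===== Notes on version B (the rewrite author's own statement) =====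
-- stated objective: alternative
-- what changed: Replaces the bottom-up triple-nested-loop DP over a 2D list with a top-down recursion memoized in a dict (same price grid, same recurrence, computed by recursive descent from (m,n) instead of filling every cell in row-major order).
import Mathlib
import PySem

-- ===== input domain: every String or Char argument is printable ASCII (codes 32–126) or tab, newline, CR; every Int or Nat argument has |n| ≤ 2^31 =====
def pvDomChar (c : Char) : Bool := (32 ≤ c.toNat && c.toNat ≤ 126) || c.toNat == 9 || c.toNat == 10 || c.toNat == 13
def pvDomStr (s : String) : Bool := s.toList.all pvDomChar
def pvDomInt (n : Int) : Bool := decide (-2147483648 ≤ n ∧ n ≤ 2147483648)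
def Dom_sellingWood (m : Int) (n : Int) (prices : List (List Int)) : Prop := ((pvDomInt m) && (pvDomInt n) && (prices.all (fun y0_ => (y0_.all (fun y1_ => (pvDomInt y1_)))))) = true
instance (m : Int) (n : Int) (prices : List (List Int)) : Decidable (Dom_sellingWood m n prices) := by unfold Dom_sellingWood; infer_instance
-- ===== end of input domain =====

-- B replaces A's bottom-up triple-nested-loop DP over a 2D list by a top-down recursion
-- memoized in a dict (same price grid, same recurrence); equal return values are proved below.

-- ===== PORT A =====
-- dp[i][j] read (IndexError cannot occur on the reads A performs inside Pre_)
def pvG (dp : List (List Int)) (i j : Int) : Int :=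
  PySem.List.pyGetD (PySem.List.pyGetD dp i []) j 0

-- dp[i][j] = v  (Python-exact, including a negative index; out-of-range writes are excluded by Pre_)
def pvS (dp : List (List Int)) (i j : Int) (v : Int) : List (List Int) :=
  PySem.List.pySetD dp i (PySem.List.pySetD (PySem.List.pyGetD dp i []) j v)

-- dp = [[0]*(n+1) for _ in range(m+1)]; for x,y,z in prices: dp[x][y] = z
-- (shared by both ports: Source B builds its `base` grid with exactly these two lines)
def pvBuildGrid (m : Int) (n : Int) (prices : List (List Int)) : List (List Int) :=
  prices.foldl (fun dp r =>
      match r with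
      | [x, y, z] => pvS dp x y z
      | _ => dp)   -- unreachable inside Pre_ (Python raises on unpacking a row of length ≠ 3)
    ((PySem.List.pyRange 0 (m + 1) 1).map (fun _ => List.replicate (n + 1).toNat (0 : Int)))

-- the body of A's two inner `for k` loops at cell (i, j)
def pvACell (dp : List (List Int)) (i j : Int) : List (List Int) :=
  let dp1 := (PySem.List.pyRange 1 i 1).foldl
    (fun dp k => pvS dp i j (max (pvG dp i j) (pvG dp (i - k) j + pvG dp k j))) dp
  (PySem.List.pyRange 1 j 1).foldl
    (fun dp k => pvS dp i j (max (pvG dp i j) (pvG dp i (j - k) + pvG dp i k))) dp1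

def sellingWood (m : Int) (n : Int) (prices : List (List Int)) : Int :=
  let dp := pvBuildGrid m n prices
  let dp := (PySem.List.pyRange 1 (m + 1) 1).foldl
    (fun dp i => (PySem.List.pyRange 1 (n + 1) 1).foldl (fun dp j => pvACell dp i j) dp) dp
  pvG dp m n

-- ===== PORT B =====
-- Source B's recursive solve(i, j) with its memo dict threaded through; the two `for k` loops are
-- the explicit counting recursions pvVLoop / pvHLoop (k = i - c resp. j - c, c counting down).
-- Indices are Nat internally (faithful on Pre_, where 0 ≤ m and 0 ≤ n).
mutual
def pvSolve (g : List (List Int)) (i j : Nat) (memo : PySem.Dict (Nat × Nat) Int) :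
    Int × PySem.Dict (Nat × Nat) Int :=
  if i = 0 ∨ j = 0 then (pvG g (i : Int) (j : Int), memo)
  else
    match memo.get? (i, j) with
    | some v => (v, memo)
    | none =>
      let s1 := pvVLoop g i j (i - 1) (pvG g (i : Int) (j : Int)) memo
      let s2 := pvHLoop g i j (j - 1) s1.1 s1.2
      (s2.1, s2.2.insert (i, j) s2.1)
termination_by (i + j, 1, 0)

def pvVLoop (g : List (List Int)) (i j c : Nat) (best : Int)
    (memo : PySem.Dict (Nat × Nat) Int) : Int × PySem.Dict (Nat × Nat) Int :=
  if h : 0 < c ∧ c < i then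
    let s1 := pvSolve g c j memo          -- solve(i - k, j) with k = i - c
    let s2 := pvSolve g (i - c) j s1.2    -- solve(k, j)
    pvVLoop g i j (c - 1) (max best (s1.1 + s2.1)) s2.2
  else (best, memo)
termination_by (i + j, 0, c)

def pvHLoop (g : List (List Int)) (i j c : Nat) (best : Int)
    (memo : PySem.Dict (Nat × Nat) Int) : Int × PySem.Dict (Nat × Nat) Int :=
  if h : 0 < c ∧ c < j then
    let s1 := pvSolve g i c memo          -- solve(i, j - k) with k = j - c
    let s2 := pvSolve g i (j - c) s1.2    -- solve(i, k)
    pvHLoop g i j (c - 1) (max best (s1.1 + s2.1)) s2.2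
  else (best, memo)
termination_by (i + j, 0, c)
end

def sellingWood_alt (m : Int) (n : Int) (prices : List (List Int)) : Int :=
  let base := pvBuildGrid m n prices
  (pvSolve base m.toNat n.toNat PySem.Dict.empty).1

-- ===== PRECONDITION & SPEC =====
-- Pre_ excludes exactly the inputs on which Python A raises: a negative dimension
-- (IndexError on dp[m][n]), a price row that is not a triple (unpacking ValueError),
-- and a piece coordinate outside Python's index range for the (m+1)×(n+1) grid (IndexError).
def Pre_sellingWood (m : Int) (n : Int) (prices : List (List Int)) : Prop :=
  0 ≤ m ∧ 0 ≤ n ∧ ∀ r ∈ prices, r.length = 3 ∧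
    PySem.Raise.InRange (m.toNat + 1) (r.getD 0 0) ∧
    PySem.Raise.InRange (n.toNat + 1) (r.getD 1 0)
instance (m : Int) (n : Int) (prices : List (List Int)) : Decidable (Pre_sellingWood m n prices) := by
  unfold Pre_sellingWood; infer_instance

def pvWitness_sellingWood : Int × Int × List (List Int) := (3, 4, [[1, 2, 5], [2, 3, 7], [1, 1, 2]])

def Spec_sellingWood (m : Int) (n : Int) (prices : List (List Int)) (out : Int) : Prop := out = sellingWood_alt m n prices
instance (m : Int) (n : Int) (prices : List (List Int)) (out : Int) : Decidable (Spec_sellingWood m n prices out) := by unfold Spec_sellingWood; infer_instance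

-- ===== CLAIM (what is proved, stated in full; the proofs are below) =====
def Claim_equal_sellingWood : Prop := ∀ (m : Int) (n : Int) (prices : List (List Int)), Dom_sellingWood m n prices → Pre_sellingWood m n prices → Spec_sellingWood m n prices (sellingWood m n prices)

-- ===== LEMMAS AND PROOFS =====

-- the common value: the DP recurrence as a pure function (fuel = i + j suffices)
def pvFF (g : List (List Int)) (fuel : Nat) (i j : Nat) : Int :=
  if i = 0 ∨ j = 0 then pvG g (i : Int) (j : Int)
  else match fuel with
  | 0 => 0
  | fuel + 1 =>
    let v1 := (List.range' 1 (i - 1)).foldl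
      (fun a k => max a (pvFF g fuel (i - k) j + pvFF g fuel k j)) (pvG g (i : Int) (j : Int))
    (List.range' 1 (j - 1)).foldl
      (fun a k => max a (pvFF g fuel i (j - k) + pvFF g fuel i k)) v1

def pvF (g : List (List Int)) (i j : Nat) : Int := pvFF g (i + j) i j

lemma pvFF_zero (g : List (List Int)) (fuel i j : Nat) (h : i = 0 ∨ j = 0) :
    pvFF g fuel i j = pvG g (i : Int) (j : Int) := by
  cases fuel <;> simp [pvFF, h]

lemma pvFF_succ (g : List (List Int)) (fuel i j : Nat) (hi : i ≠ 0) (hj : j ≠ 0) :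
    pvFF g (fuel + 1) i j = (List.range' 1 (j - 1)).foldl
      (fun a k => max a (pvFF g fuel i (j - k) + pvFF g fuel i k))
      ((List.range' 1 (i - 1)).foldl
        (fun a k => max a (pvFF g fuel (i - k) j + pvFF g fuel k j)) (pvG g (i : Int) (j : Int))) := by
  simp [pvFF, hi, hj]

lemma pvFF_congr (g : List (List Int)) :
    ∀ f1 f2 i j, i + j ≤ f1 → i + j ≤ f2 → pvFF g f1 i j = pvFF g f2 i j := by
  intro f1
  induction f1 using Nat.strong_induction_on with
  | _ f1 ih =>
    intro f2 i j h1 h2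
    by_cases hz : i = 0 ∨ j = 0
    · rw [pvFF_zero g f1 i j hz, pvFF_zero g f2 i j hz]
    · rw [not_or] at hz
      obtain ⟨a, rfl⟩ : ∃ a, f1 = a + 1 := ⟨f1 - 1, by omega⟩
      obtain ⟨b, rfl⟩ : ∃ b, f2 = b + 1 := ⟨f2 - 1, by omega⟩
      rw [pvFF_succ g a i j hz.1 hz.2, pvFF_succ g b i j hz.1 hz.2]
      have hcv : (List.range' 1 (i - 1)).foldl
          (fun a_1 k => max a_1 (pvFF g a (i - k) j + pvFF g a k j)) (pvG g (i : Int) (j : Int)) =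
          (List.range' 1 (i - 1)).foldl
          (fun a_1 k => max a_1 (pvFF g b (i - k) j + pvFF g b k j)) (pvG g (i : Int) (j : Int)) := by
        apply PySem.List.foldl_congr_mem
        intro acc k hk
        have hk' := List.mem_range'_1.mp hk
        rw [ih a (by omega) b (i - k) j (by omega) (by omega),
            ih a (by omega) b k j (by omega) (by omega)]
      rw [hcv]
      apply PySem.List.foldl_congr_mem
      intro acc k hk
      have hk' := List.mem_range'_1.mp hk
      rw [ih a (by omega) b i (j - k) (by omega) (by omega),
          ih a (by omega) b i k (by omega) (by omega)]

lemma pvF_zero (g : List (List Int)) (i j : Nat) (h : i = 0 ∨ j = 0) :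
    pvF g i j = pvG g (i : Int) (j : Int) := by
  rw [pvF, pvFF_zero g (i + j) i j h]

lemma pvF_eq (g : List (List Int)) (i j : Nat) (hi : i ≠ 0) (hj : j ≠ 0) :
    pvF g i j = (List.range' 1 (j - 1)).foldl
      (fun a k => max a (pvF g i (j - k) + pvF g i k))
      ((List.range' 1 (i - 1)).foldl
        (fun a k => max a (pvF g (i - k) j + pvF g k j)) (pvG g (i : Int) (j : Int))) := by
  obtain ⟨s, hs⟩ : ∃ s, i + j = s + 1 := ⟨i + j - 1, by omega⟩
  rw [pvF, hs, pvFF_succ g s i j hi hj]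
  have hcv : (List.range' 1 (i - 1)).foldl
      (fun a k => max a (pvFF g s (i - k) j + pvFF g s k j)) (pvG g (i : Int) (j : Int)) =
      (List.range' 1 (i - 1)).foldl
      (fun a k => max a (pvF g (i - k) j + pvF g k j)) (pvG g (i : Int) (j : Int)) := by
    apply PySem.List.foldl_congr_mem
    intro acc k hk
    have hk' := List.mem_range'_1.mp hk
    simp only [pvF]
    rw [pvFF_congr g s ((i - k) + j) (i - k) j (by omega) (by omega),
        pvFF_congr g s (k + j) k j (by omega) (by omega)]
  rw [hcv]
  apply PySem.List.foldl_congr_mem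
  intro acc k hk
  have hk' := List.mem_range'_1.mp hk
  simp only [pvF]
  rw [pvFF_congr g s (i + (j - k)) i (j - k) (by omega) (by omega),
      pvFF_congr g s (i + k) i k (by omega) (by omega)]

-- ---- B side: memo invariant ----
def pvInv (g : List (List Int)) (memo : PySem.Dict (Nat × Nat) Int) : Prop :=
  ∀ p v, memo.get? p = some v → v = pvF g p.1 p.2

lemma pvVLoop_spec (g : List (List Int)) (i j fuel : Nat) (hfuel : i + j ≤ fuel + 1)
    (IH : ∀ i' j' memo', i' + j' ≤ fuel → pvInv g memo' →
      (pvSolve g i' j' memo').1 = pvF g i' j' ∧ pvInv g (pvSolve g i' j' memo').2) :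
    ∀ c best memo, c < i → pvInv g memo →
      (pvVLoop g i j c best memo).1 =
        (List.range' (i - c) c).foldl (fun a k => max a (pvF g (i - k) j + pvF g k j)) best ∧
      pvInv g (pvVLoop g i j c best memo).2 := by
  intro c
  induction c with
  | zero =>
    intro best memo hc hinv
    rw [pvVLoop]
    simp [hinv]
  | succ c ihc =>
    intro best memo hc hinv
    have hcond : 0 < c + 1 ∧ c + 1 < i := ⟨by omega, hc⟩
    obtain ⟨h1v, h1i⟩ := IH (c + 1) j memo (by omega) hinv
    obtain ⟨h2v, h2i⟩ := IH (i - (c + 1)) j (pvSolve g (c + 1) j memo).2 (by omega) h1i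
    obtain ⟨h3v, h3i⟩ := ihc (max best ((pvSolve g (c + 1) j memo).1 +
      (pvSolve g (i - (c + 1)) j (pvSolve g (c + 1) j memo).2).1))
      (pvSolve g (i - (c + 1)) j (pvSolve g (c + 1) j memo).2).2 (by omega) h2i
    rw [pvVLoop, dif_pos hcond]
    simp only [Nat.add_sub_cancel]
    refine ⟨?_, h3i⟩
    rw [h3v, h1v, h2v]
    have hr : List.range' (i - (c + 1)) (c + 1) = (i - (c + 1)) :: List.range' (i - c) c := by
      rw [List.range'_succ, show i - (c + 1) + 1 = i - c from by omega]
    rw [hr, List.foldl_cons]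
    have he : i - (i - (c + 1)) = c + 1 := by omega
    rw [he]

lemma pvHLoop_spec (g : List (List Int)) (i j fuel : Nat) (hfuel : i + j ≤ fuel + 1)
    (IH : ∀ i' j' memo', i' + j' ≤ fuel → pvInv g memo' →
      (pvSolve g i' j' memo').1 = pvF g i' j' ∧ pvInv g (pvSolve g i' j' memo').2) :
    ∀ c best memo, c < j → pvInv g memo →
      (pvHLoop g i j c best memo).1 =
        (List.range' (j - c) c).foldl (fun a k => max a (pvF g i (j - k) + pvF g i k)) best ∧
      pvInv g (pvHLoop g i j c best memo).2 := by
  intro c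
  induction c with
  | zero =>
    intro best memo hc hinv
    rw [pvHLoop]
    simp [hinv]
  | succ c ihc =>
    intro best memo hc hinv
    have hcond : 0 < c + 1 ∧ c + 1 < j := ⟨by omega, hc⟩
    obtain ⟨h1v, h1i⟩ := IH i (c + 1) memo (by omega) hinv
    obtain ⟨h2v, h2i⟩ := IH i (j - (c + 1)) (pvSolve g i (c + 1) memo).2 (by omega) h1i
    obtain ⟨h3v, h3i⟩ := ihc (max best ((pvSolve g i (c + 1) memo).1 +
      (pvSolve g i (j - (c + 1)) (pvSolve g i (c + 1) memo).2).1))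
      (pvSolve g i (j - (c + 1)) (pvSolve g i (c + 1) memo).2).2 (by omega) h2i
    rw [pvHLoop, dif_pos hcond]
    simp only [Nat.add_sub_cancel]
    refine ⟨?_, h3i⟩
    rw [h3v, h1v, h2v]
    have hr : List.range' (j - (c + 1)) (c + 1) = (j - (c + 1)) :: List.range' (j - c) c := by
      rw [List.range'_succ, show j - (c + 1) + 1 = j - c from by omega]
    rw [hr, List.foldl_cons]
    have he : j - (j - (c + 1)) = c + 1 := by omega
    rw [he]

lemma pvSolve_spec (g : List (List Int)) :
    ∀ fuel i j memo, i + j ≤ fuel → pvInv g memo →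
      (pvSolve g i j memo).1 = pvF g i j ∧ pvInv g (pvSolve g i j memo).2 := by
  intro fuel
  induction fuel with
  | zero =>
    intro i j memo hle hinv
    have hz : i = 0 ∨ j = 0 := by omega
    rw [pvSolve, if_pos hz]
    exact ⟨(pvF_zero g i j hz).symm, hinv⟩
  | succ fuel ih =>
    intro i j memo hle hinv
    by_cases hz : i = 0 ∨ j = 0
    · rw [pvSolve, if_pos hz]
      exact ⟨(pvF_zero g i j hz).symm, hinv⟩
    · rw [not_or] at hz
      rw [pvSolve, if_neg (by simp [hz.1, hz.2])]
      cases hmemo : memo.get? (i, j) with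
      | some v =>
        simp only [hmemo]
        exact ⟨hinv (i, j) v hmemo, hinv⟩
      | none =>
        simp only [hmemo]
        obtain ⟨hv1, hi1⟩ := pvVLoop_spec g i j fuel hle ih (i - 1)
          (pvG g (i : Int) (j : Int)) memo (by omega) hinv
        obtain ⟨hv2, hi2⟩ := pvHLoop_spec g i j fuel hle ih (j - 1)
          (pvVLoop g i j (i - 1) (pvG g (i : Int) (j : Int)) memo).1
          (pvVLoop g i j (i - 1) (pvG g (i : Int) (j : Int)) memo).2 (by omega) hi1
        have hval : (pvHLoop g i j (j - 1)
            (pvVLoop g i j (i - 1) (pvG g (i : Int) (j : Int)) memo).1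
            (pvVLoop g i j (i - 1) (pvG g (i : Int) (j : Int)) memo).2).1 = pvF g i j := by
          rw [hv2, hv1, show i - (i - 1) = 1 from by omega, show j - (j - 1) = 1 from by omega,
            pvF_eq g i j (by omega) (by omega)]
        refine ⟨hval, ?_⟩
        intro p v hp
        by_cases hpe : p = (i, j)
        · subst hpe
          rw [PySem.Dict.get?_insert_self] at hp
          cases hp
          exact hval.symm ▸ rfl
        · rw [PySem.Dict.get?_insert_of_ne _ _ hpe] at hp
          exact hi2 p v hp

lemma pvInv_empty (g : List (List Int)) : pvInv g PySem.Dict.empty := by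
  intro p v hp
  rw [PySem.Dict.get?_empty] at hp
  cases hp

lemma pvB_eval (m n : Int) (prices : List (List Int)) :
    sellingWood_alt m n prices = pvF (pvBuildGrid m n prices) m.toNat n.toNat := by
  unfold sellingWood_alt
  exact (pvSolve_spec (pvBuildGrid m n prices) (m.toNat + n.toNat) m.toNat n.toNat
    PySem.Dict.empty (le_refl _) (pvInv_empty _)).1

-- ---- A side: table invariant ----
def pvTblEq (M N : Nat) (dp : List (List Int)) (f : Nat → Nat → Int) : Prop :=
  dp.length = M + 1 ∧ (∀ r ∈ dp, r.length = N + 1) ∧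
  ∀ p q, p ≤ M → q ≤ N → pvG dp (p : Int) (q : Int) = f p q

def pvUpd (f : Nat → Nat → Int) (p0 q0 : Nat) (v : Int) : Nat → Nat → Int :=
  fun p q => if p = p0 ∧ q = q0 then v else f p q

-- the table function after the cells up to row i0, column q0 (inclusive) have been processed
def pvfA (g : List (List Int)) (i0 q0 : Nat) (p q : Nat) : Int :=
  if p = 0 ∨ q = 0 ∨ p < i0 ∨ (p = i0 ∧ q ≤ q0) then pvF g p q else pvG g (p : Int) (q : Int)

lemma pvTblEq_congr (M N : Nat) (dp : List (List Int)) (f f' : Nat → Nat → Int)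
    (h : ∀ p q, p ≤ M → q ≤ N → f p q = f' p q) (hT : pvTblEq M N dp f) : pvTblEq M N dp f' :=
  ⟨hT.1, hT.2.1, fun p q hp hq => (hT.2.2 p q hp hq).trans (h p q hp hq)⟩

lemma pvMem_pySetD {α : Type} (xs : List α) (i : Int) (v : α) {r : α}
    (hr : r ∈ PySem.List.pySetD xs i v) : r ∈ xs ∨ r = v := by
  unfold PySem.List.pySetD PySem.List.pySet? at hr
  cases h : PySem.List.pyIdx? xs.length i with
  | none => rw [h] at hr; simp at hr; exact Or.inl hr
  | some k =>
    rw [h] at hr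
    simp only [Option.map_some, Option.getD_some] at hr
    exact List.mem_or_eq_of_mem_set hr

lemma pvSetD_out {α : Type} (xs : List α) (i : Int) (v : α)
    (h : ¬ PySem.Raise.InRange xs.length i) : PySem.List.pySetD xs i v = xs := by
  unfold PySem.List.pySetD
  rw [(PySem.List.pySet?_eq_none_iff xs i v).mpr h]
  rfl

lemma pvS_shape (M N : Nat) (dp : List (List Int)) (x y v : Int)
    (hlen : dp.length = M + 1) (hrows : ∀ r ∈ dp, r.length = N + 1) :
    (pvS dp x y v).length = M + 1 ∧ ∀ r ∈ pvS dp x y v, r.length = N + 1 := by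
  unfold pvS
  refine ⟨by rw [PySem.List.length_pySetD]; exact hlen, ?_⟩
  by_cases hIR : PySem.Raise.InRange dp.length x
  · intro r hr
    rcases pvMem_pySetD _ _ _ hr with h | h
    · exact hrows r h
    · rw [h, PySem.List.length_pySetD]
      exact hrows _ (PySem.List.pyGetD_mem dp [] hIR)
  · rw [pvSetD_out _ _ _ hIR]
    exact hrows

lemma pvS_tbl (M N : Nat) (dp : List (List Int)) (f : Nat → Nat → Int) (p0 q0 : Nat) (v : Int)
    (hT : pvTblEq M N dp f) (hp0 : p0 ≤ M) (hq0 : q0 ≤ N) :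
    pvTblEq M N (pvS dp (p0 : Int) (q0 : Int) v) (pvUpd f p0 q0 v) := by
  obtain ⟨hlen, hrows, hread⟩ := hT
  have hp0' : p0 < dp.length := by omega
  have hrowlen : (PySem.List.pyGetD dp (p0 : Int) ([] : List Int)).length = N + 1 := by
    rw [PySem.List.pyGetD_natCast, List.getD_eq_getElem dp [] (by omega)]
    exact hrows _ (List.getElem_mem _)
  obtain ⟨hlen', hrows'⟩ := pvS_shape M N dp (p0 : Int) (q0 : Int) v hlen hrows
  refine ⟨hlen', hrows', ?_⟩
  intro p q hp hq
  unfold pvS pvUpd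
  unfold pvG
  rw [PySem.List.pyGetD_pySetD_natCast dp p0 p _ [] (by omega)]
  by_cases hpp : p = p0
  · subst hpp
    rw [if_pos rfl, PySem.List.pyGetD_pySetD_natCast _ q0 q v 0 (by omega)]
    by_cases hqq : q = q0
    · subst hqq
      rw [if_pos rfl, if_pos ⟨rfl, rfl⟩]
    · rw [if_neg hqq, if_neg (by tauto)]
      exact hread p q hp hq
  · rw [if_neg hpp, if_neg (by tauto)]
    exact hread p q hp hq

lemma pvGrid_shape (m n : Int) (prices : List (List Int)) (hm : 0 ≤ m) (hn : 0 ≤ n) :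
    pvTblEq m.toNat n.toNat (pvBuildGrid m n prices)
      (fun p q => pvG (pvBuildGrid m n prices) (p : Int) (q : Int)) := by
  have key : ∀ (l : List (List Int)) (dp : List (List Int)),
      dp.length = m.toNat + 1 → (∀ r ∈ dp, r.length = n.toNat + 1) →
      (l.foldl (fun dp r => match r with
        | [x, y, z] => pvS dp x y z
        | _ => dp) dp).length = m.toNat + 1 ∧
      ∀ r ∈ (l.foldl (fun dp r => match r with
        | [x, y, z] => pvS dp x y z
        | _ => dp) dp), r.length = n.toNat + 1 := by
    intro l
    induction l with
    | nil => intro dp h1 h2; exact ⟨h1, h2⟩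
    | cons r0 l ih =>
      intro dp h1 h2
      simp only [List.foldl_cons]
      match r0 with
      | [] => exact ih dp h1 h2
      | [a] => exact ih dp h1 h2
      | [a, b] => exact ih dp h1 h2
      | a :: b :: c :: d :: t => exact ih dp h1 h2
      | [x, y, z] =>
        obtain ⟨h1', h2'⟩ := pvS_shape m.toNat n.toNat dp x y z h1 h2
        exact ih _ h1' h2'
  have init1 : ((PySem.List.pyRange 0 (m + 1) 1).map
      (fun _ => List.replicate (n + 1).toNat (0 : Int))).length = m.toNat + 1 := by
    rw [List.length_map, PySem.List.length_pyRange_one]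
    omega
  have init2 : ∀ r ∈ ((PySem.List.pyRange 0 (m + 1) 1).map
      (fun _ => List.replicate (n + 1).toNat (0 : Int))), r.length = n.toNat + 1 := by
    intro r hr
    obtain ⟨_, _, rfl⟩ := List.mem_map.mp hr
    rw [List.length_replicate]
    omega
  obtain ⟨hh1, hh2⟩ := key prices _ init1 init2
  exact ⟨hh1, hh2, fun p q _ _ => rfl⟩

-- `for k in range(1, x)` over Int indices, as a fold over the Nat list [1, …, x-1]
lemma foldl_pyRange_cast {β : Type} (x : Nat) (f : β → Int → β) (b : β) :
    (PySem.List.pyRange 1 (x : Int) 1).foldl f b =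
      (List.range' 1 (x - 1)).foldl (fun acc (k : Nat) => f acc (k : Int)) b := by
  rw [PySem.List.pyRange_one, List.range'_eq_map_range, List.foldl_map, List.foldl_map,
    show (((x : Int) - 1)).toNat = x - 1 from by omega]
  apply PySem.List.foldl_congr_mem
  intro acc k _
  congr 1

lemma pvUpd_self (f : Nat → Nat → Int) (p0 q0 p q : Nat) :
    pvUpd f p0 q0 (f p0 q0) p q = f p q := by
  unfold pvUpd
  by_cases h : p = p0 ∧ q = q0
  · rw [if_pos h, h.1, h.2]
  · rw [if_neg h]

lemma pvUpd_collapse (f : Nat → Nat → Int) (p0 q0 : Nat) (a b : Int) (p q : Nat) :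
    pvUpd (pvUpd f p0 q0 a) p0 q0 b p q = pvUpd f p0 q0 b p q := by
  unfold pvUpd
  by_cases h : p = p0 ∧ q = q0 <;> simp [h]

lemma pvVFold (g : List (List Int)) (M N i0 j0 : Nat) (f : Nat → Nat → Int)
    (_hi : 1 ≤ i0) (hiM : i0 ≤ M) (_hj : 1 ≤ j0) (hjN : j0 ≤ N)
    (hdone : ∀ p q, p ≤ M → q ≤ N → (p < i0 ∨ (p = i0 ∧ q < j0)) → f p q = pvF g p q) :
    ∀ c s, s + c = i0 → 1 ≤ s → ∀ cur dp, pvTblEq M N dp (pvUpd f i0 j0 cur) →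
      pvTblEq M N
        ((List.range' s c).foldl (fun dp (k : Nat) => pvS dp (i0 : Int) (j0 : Int)
          (max (pvG dp (i0 : Int) (j0 : Int))
            (pvG dp ((i0 : Int) - (k : Int)) (j0 : Int) + pvG dp (k : Int) (j0 : Int)))) dp)
        (pvUpd f i0 j0 ((List.range' s c).foldl
          (fun a k => max a (pvF g (i0 - k) j0 + pvF g k j0)) cur)) := by
  intro c
  induction c with
  | zero => intro s hsc hs cur dp hT; simpa using hT
  | succ c ihc =>
    intro s hsc hs cur dp hT
    rw [List.range'_succ, List.foldl_cons, List.foldl_cons]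
    have hread1 : pvG dp (i0 : Int) (j0 : Int) = cur := by
      rw [hT.2.2 i0 j0 hiM hjN]
      unfold pvUpd
      rw [if_pos ⟨rfl, rfl⟩]
    have hread2 : pvG dp ((i0 : Int) - (s : Int)) (j0 : Int) = pvF g (i0 - s) j0 := by
      rw [show (i0 : Int) - (s : Int) = ((i0 - s : Nat) : Int) from by omega,
        hT.2.2 (i0 - s) j0 (by omega) hjN]
      unfold pvUpd
      rw [if_neg (by omega)]
      exact hdone (i0 - s) j0 (by omega) hjN (Or.inl (by omega))
    have hread3 : pvG dp (s : Int) (j0 : Int) = pvF g s j0 := by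
      rw [hT.2.2 s j0 (by omega) hjN]
      unfold pvUpd
      rw [if_neg (by omega)]
      exact hdone s j0 (by omega) hjN (Or.inl (by omega))
    rw [hread1, hread2, hread3]
    have hstep := pvS_tbl M N dp (pvUpd f i0 j0 cur) i0 j0
      (max cur (pvF g (i0 - s) j0 + pvF g s j0)) hT hiM hjN
    exact ihc (s + 1) (by omega) (by omega) _ _
      (pvTblEq_congr M N _ _ _ (fun p q _ _ => pvUpd_collapse f i0 j0 cur _ p q) hstep)

lemma pvHFold (g : List (List Int)) (M N i0 j0 : Nat) (f : Nat → Nat → Int)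
    (_hi : 1 ≤ i0) (hiM : i0 ≤ M) (_hj : 1 ≤ j0) (hjN : j0 ≤ N)
    (hdone : ∀ p q, p ≤ M → q ≤ N → (p < i0 ∨ (p = i0 ∧ q < j0)) → f p q = pvF g p q) :
    ∀ c s, s + c = j0 → 1 ≤ s → ∀ cur dp, pvTblEq M N dp (pvUpd f i0 j0 cur) →
      pvTblEq M N
        ((List.range' s c).foldl (fun dp (k : Nat) => pvS dp (i0 : Int) (j0 : Int)
          (max (pvG dp (i0 : Int) (j0 : Int))
            (pvG dp (i0 : Int) ((j0 : Int) - (k : Int)) + pvG dp (i0 : Int) (k : Int)))) dp)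
        (pvUpd f i0 j0 ((List.range' s c).foldl
          (fun a k => max a (pvF g i0 (j0 - k) + pvF g i0 k)) cur)) := by
  intro c
  induction c with
  | zero => intro s hsc hs cur dp hT; simpa using hT
  | succ c ihc =>
    intro s hsc hs cur dp hT
    rw [List.range'_succ, List.foldl_cons, List.foldl_cons]
    have hread1 : pvG dp (i0 : Int) (j0 : Int) = cur := by
      rw [hT.2.2 i0 j0 hiM hjN]
      unfold pvUpd
      rw [if_pos ⟨rfl, rfl⟩]
    have hread2 : pvG dp (i0 : Int) ((j0 : Int) - (s : Int)) = pvF g i0 (j0 - s) := by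
      rw [show (j0 : Int) - (s : Int) = ((j0 - s : Nat) : Int) from by omega,
        hT.2.2 i0 (j0 - s) hiM (by omega)]
      unfold pvUpd
      rw [if_neg (by omega)]
      exact hdone i0 (j0 - s) hiM (by omega) (Or.inr ⟨rfl, by omega⟩)
    have hread3 : pvG dp (i0 : Int) (s : Int) = pvF g i0 s := by
      rw [hT.2.2 i0 s hiM (by omega)]
      unfold pvUpd
      rw [if_neg (by omega)]
      exact hdone i0 s hiM (by omega) (Or.inr ⟨rfl, by omega⟩)
    rw [hread1, hread2, hread3]
    have hstep := pvS_tbl M N dp (pvUpd f i0 j0 cur) i0 j0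
      (max cur (pvF g i0 (j0 - s) + pvF g i0 s)) hT hiM hjN
    exact ihc (s + 1) (by omega) (by omega) _ _
      (pvTblEq_congr M N _ _ _ (fun p q _ _ => pvUpd_collapse f i0 j0 cur _ p q) hstep)

lemma pvCell_spec (g : List (List Int)) (M N : Nat) (dp : List (List Int)) (f : Nat → Nat → Int)
    (i0 j0 : Nat) (hT : pvTblEq M N dp f)
    (hi : 1 ≤ i0) (hiM : i0 ≤ M) (hj : 1 ≤ j0) (hjN : j0 ≤ N)
    (hdone : ∀ p q, p ≤ M → q ≤ N → (p < i0 ∨ (p = i0 ∧ q < j0)) → f p q = pvF g p q)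
    (hbase : f i0 j0 = pvG g (i0 : Int) (j0 : Int)) :
    pvTblEq M N (pvACell dp (i0 : Int) (j0 : Int)) (pvUpd f i0 j0 (pvF g i0 j0)) := by
  have hT0 : pvTblEq M N dp (pvUpd f i0 j0 (f i0 j0)) :=
    pvTblEq_congr M N dp f _ (fun p q _ _ => (pvUpd_self f i0 j0 p q).symm) hT
  have h1 := pvVFold g M N i0 j0 f hi hiM hj hjN hdone (i0 - 1) 1 (by omega) (le_refl 1)
    (f i0 j0) dp hT0
  have h2 := pvHFold g M N i0 j0 f hi hiM hj hjN hdone (j0 - 1) 1 (by omega) (le_refl 1)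
    ((List.range' 1 (i0 - 1)).foldl (fun a k => max a (pvF g (i0 - k) j0 + pvF g k j0)) (f i0 j0))
    _ h1
  unfold pvACell
  rw [foldl_pyRange_cast i0, foldl_pyRange_cast j0]
  refine pvTblEq_congr M N _ _ _ (fun p q _ _ => ?_) h2
  unfold pvUpd
  rw [pvF_eq g i0 j0 (by omega) (by omega), hbase]

lemma pvRow (g : List (List Int)) (M N i0 : Nat) (hi : 1 ≤ i0) (hiM : i0 ≤ M) :
    ∀ c s dp, s + c = N + 1 → 1 ≤ s → pvTblEq M N dp (pvfA g i0 (s - 1)) →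
      pvTblEq M N
        ((List.range' s c).foldl (fun dp (j : Nat) => pvACell dp (i0 : Int) (j : Int)) dp)
        (pvfA g i0 (s - 1 + c)) := by
  intro c
  induction c with
  | zero => intro s dp hsc hs hT; simpa using hT
  | succ c ihc =>
    intro s dp hsc hs hT
    rw [List.range'_succ, List.foldl_cons]
    have hcell := pvCell_spec g M N dp (pvfA g i0 (s - 1)) i0 s hT hi hiM (by omega) (by omega)
      (fun p q hp hq hcase => by
        unfold pvfA
        rw [if_pos (by omega)])
      (by
        unfold pvfA
        rw [if_neg (by omega)])
    have hT' : pvTblEq M N (pvACell dp (i0 : Int) (s : Int)) (pvfA g i0 ((s + 1) - 1)) := by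
      refine pvTblEq_congr M N _ _ _ (fun p q hp hq => ?_) hcell
      unfold pvUpd pvfA
      by_cases hpq : p = i0 ∧ q = s
      · rw [if_pos hpq, if_pos (by omega), hpq.1, hpq.2]
      · rw [if_neg hpq]
        by_cases hc : p = 0 ∨ q = 0 ∨ p < i0 ∨ (p = i0 ∧ q ≤ s - 1)
        · rw [if_pos hc, if_pos (by omega)]
        · rw [if_neg hc, if_neg (by omega)]
    have := ihc (s + 1) _ (by omega) (by omega) hT'
    rw [show (s + 1) - 1 + c = s - 1 + (c + 1) from by omega] at this
    exact this

lemma pvOuter (g : List (List Int)) (M N : Nat) :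
    ∀ c s dp, s + c = M + 1 → 1 ≤ s → pvTblEq M N dp (pvfA g s 0) →
      pvTblEq M N
        ((List.range' s c).foldl (fun dp (k : Nat) =>
          (List.range' 1 N).foldl (fun dp (j : Nat) => pvACell dp (k : Int) (j : Int)) dp) dp)
        (pvfA g (s + c) 0) := by
  intro c
  induction c with
  | zero => intro s dp hsc hs hT; simpa using hT
  | succ c ihc =>
    intro s dp hsc hs hT
    rw [List.range'_succ, List.foldl_cons]
    have hrow := pvRow g M N s hs (by omega) N 1 dp (by omega) (le_refl 1) hT
    have hT' : pvTblEq M N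
        ((List.range' 1 N).foldl (fun dp (j : Nat) => pvACell dp (s : Int) (j : Int)) dp)
        (pvfA g (s + 1) 0) := by
      refine pvTblEq_congr M N _ _ _ (fun p q hp hq => ?_) hrow
      unfold pvfA
      by_cases hc : p = 0 ∨ q = 0 ∨ p < s ∨ (p = s ∧ q ≤ 1 - 1 + N)
      · rw [if_pos hc, if_pos (by omega)]
      · rw [if_neg hc, if_neg (by omega)]
    have := ihc (s + 1) _ (by omega) (by omega) hT'
    rw [show s + 1 + c = s + (c + 1) from by omega] at this
    exact this

lemma pvA_eval (m n : Int) (prices : List (List Int)) (hm : 0 ≤ m) (hn : 0 ≤ n) :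
    sellingWood m n prices = pvF (pvBuildGrid m n prices) m.toNat n.toNat := by
  simp only [sellingWood]
  rw [show m = (m.toNat : Int) from by omega, show n = (n.toNat : Int) from by omega]
  simp only [Int.toNat_natCast]
  rw [show (m.toNat : Int) + 1 = ((m.toNat + 1 : Nat) : Int) from by push_cast; ring,
    show (n.toNat : Int) + 1 = ((n.toNat + 1 : Nat) : Int) from by push_cast; ring]
  simp only [foldl_pyRange_cast, Nat.add_sub_cancel]
  have hinit : pvTblEq m.toNat n.toNat (pvBuildGrid ((m.toNat : Nat) : Int) ((n.toNat : Nat) : Int) prices)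
      (pvfA (pvBuildGrid ((m.toNat : Nat) : Int) ((n.toNat : Nat) : Int) prices) 1 0) := by
    refine pvTblEq_congr _ _ _ _ _ (fun p q hp hq => ?_)
      (pvGrid_shape ((m.toNat : Nat) : Int) ((n.toNat : Nat) : Int) prices (by omega) (by omega))
    unfold pvfA
    by_cases h : p = 0 ∨ q = 0 ∨ p < 1 ∨ (p = 1 ∧ q ≤ 0)
    · rw [if_pos h, pvF_zero _ p q (by omega)]
    · rw [if_neg h]
  have hmain := pvOuter (pvBuildGrid ((m.toNat : Nat) : Int) ((n.toNat : Nat) : Int) prices)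
    m.toNat n.toNat m.toNat 1 _ (by omega) (le_refl 1) hinit
  have := hmain.2.2 m.toNat n.toNat (le_refl _) (le_refl _)
  rw [this]
  unfold pvfA
  rw [if_pos (by omega)]

-- ===== VERDICT (by name: the statement is the Claim_ definition above) =====
theorem sellingWood_spec : Claim_equal_sellingWood := by
  intro m n prices _ hpre
  unfold Spec_sellingWood
  rw [pvA_eval m n prices hpre.1 hpre.2.1, pvB_eval]
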